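-- pv_equiv track=rewrite | github.com/s0y4hh/Group2_DSA | Policeman_and_Thieves.py | police_and_thieves
-- ===== SOURCE A (Python) =====
-- def police_and_thieves(grid, k):
--     """Function to fine the maximum number of thieves that can be caught in the grid each police can catch only one thief"""
--     caught = 0
--
--     # Traverse the grid by each row
--     for row in grid:
--
--         # Traverse each coloumn in the row
--         for coloumn in range(len(row)):
--
--             # If the coloumn has a police
--             if row[coloumn] == 'P':
--
--                 # Traverse the coloumn from the left to right of the police till the range of k
--                 for item in range(coloumn-k, coloumn+k+1):
--
--                     # If the item is in the range of the coloumn then continue to find the thief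
--                     if item >= 0 and item < len(row):
--
--                         # If theres a thief in the range of police then catch the thief
--                         if row[item] == 'T':
--
--                             # Add 1 to the caught thief
--                             caught += 1
--
--                             # the cahnge the thief to caught and break the loop to find another thief
--                             row[item] = 'C'
--                             break
--
--     # Return the total number of thieves caught after searchin all rows
--     return f"\nThe total thieves caught are: {caught}"
-- ===== SOURCE B (Python) =====
-- def police_and_thieves(grid, k):
--     """Count the thieves caught (each police catches the leftmost uncaught
--     thief within distance k in its row), by one merged two-pointer sweep per
--     row over the pre-collected police and thief positions.
--     Note: unlike the original, this does not mutate the rows; the equivalence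
--     claimed is about the return value only."""
--     caught = 0
--     for row in grid:
--         police = [i for i, v in enumerate(row) if v == 'P']
--         thieves = [i for i, v in enumerate(row) if v == 'T']
--         i = j = 0
--         while i < len(police) and j < len(thieves):
--             c, t = police[i], thieves[j]
--             if t < c - k:
--                 j += 1          # this thief is forever out of reach
--             elif t > c + k:
--                 i += 1          # this police catches nothing
--             else:
--                 caught += 1     # leftmost reachable thief is caught
--                 i += 1
--                 j += 1
--     return f"\nThe total thieves caught are: {caught}"
-- ===== Notes on version B (the rewrite author's own statement) =====
-- stated objective: alternative
-- what changed: Replaces the per-police scan of all 2k+1 window cells (with in-place marking of caught thieves) by a single two-pointer sweep per row over the pre-collected police and thief index lists; B does not mutate the grid.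
import Mathlib
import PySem

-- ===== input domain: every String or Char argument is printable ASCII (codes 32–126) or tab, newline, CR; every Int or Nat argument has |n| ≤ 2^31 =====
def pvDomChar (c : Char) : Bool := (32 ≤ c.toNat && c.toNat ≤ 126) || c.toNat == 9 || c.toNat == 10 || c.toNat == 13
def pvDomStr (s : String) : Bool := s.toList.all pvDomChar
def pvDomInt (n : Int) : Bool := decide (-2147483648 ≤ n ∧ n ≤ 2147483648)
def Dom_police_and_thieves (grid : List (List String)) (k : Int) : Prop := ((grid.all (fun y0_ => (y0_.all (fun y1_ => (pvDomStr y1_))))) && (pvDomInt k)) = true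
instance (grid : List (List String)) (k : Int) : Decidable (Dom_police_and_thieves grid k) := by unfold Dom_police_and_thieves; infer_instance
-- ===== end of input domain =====

-- B replaces A's per-police scan of the 2k+1 window cells (with in-place marking of caught
-- thieves) by one two-pointer sweep per row over the police/thief index lists; A mutates the
-- grid's rows in place and B does not — the equivalence proved is about the return value only.

-- ===== PORT A =====
-- inner loop: 'for item in range(coloumn-k, coloumn+k+1): … break' — state (row, caught)
def pvInnerA (st : List String × Int) : List Int → List String × Int
  | [] => st
  | item :: rest =>
    if 0 ≤ item ∧ item < (st.1.length : Int) then
      if PySem.List.pyGet? st.1 item = some "T" then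
        (PySem.List.pySetD st.1 item "C", st.2 + 1)
      else pvInnerA st rest
    else pvInnerA st rest

-- column loop: 'for coloumn in range(len(row)): if row[coloumn] == "P": …'
def pvColsA (k : Int) (st : List String × Int) : List Int → List String × Int
  | [] => st
  | c :: cs =>
    if PySem.List.pyGet? st.1 c = some "P" then
      pvColsA k (pvInnerA st (PySem.List.pyRange (c - k) (c + k + 1) 1)) cs
    else pvColsA k st cs

def police_and_thieves (grid : List (List String)) (k : Int) : String :=
  let caught := grid.foldl
    (fun acc row => (pvColsA k (row, acc) (PySem.List.pyRange 0 (row.length : Int) 1)).2) 0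
  "\nThe total thieves caught are: " ++ PySem.Int.toStr caught

-- ===== PORT B =====
-- '[i for i, v in enumerate(row) if v == s]'
def pvIdxOf (s : String) (row : List String) : List Int :=
  ((PySem.List.enumerate row 0).filter (fun p => p.2 == s)).map (·.1)

-- the two-pointer while loop, on the suffixes of the two index lists
def pvTwoPtr (k : Int) : List Int → List Int → Int
  | [], _ => 0
  | _ :: _, [] => 0
  | c :: ps, t :: ts =>
    if t < c - k then pvTwoPtr k (c :: ps) ts
    else if t > c + k then pvTwoPtr k ps (t :: ts)
    else 1 + pvTwoPtr k ps ts
termination_by ps ts => ps.length + ts.length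

def police_and_thieves_alt (grid : List (List String)) (k : Int) : String :=
  let caught := grid.foldl
    (fun acc row => acc + pvTwoPtr k (pvIdxOf "P" row) (pvIdxOf "T" row)) 0
  "\nThe total thieves caught are: " ++ PySem.Int.toStr caught

-- ===== PRECONDITION & SPEC =====
def Spec_police_and_thieves (grid : List (List String)) (k : Int) (out : String) : Prop := out = police_and_thieves_alt grid k
instance (grid : List (List String)) (k : Int) (out : String) : Decidable (Spec_police_and_thieves grid k out) := by unfold Spec_police_and_thieves; infer_instance

-- ===== CLAIM (what is proved, stated in full; the proofs are below) =====
def Claim_equal_police_and_thieves : Prop := ∀ (grid : List (List String)) (k : Int), Dom_police_and_thieves grid k → Spec_police_and_thieves grid k (police_and_thieves grid k)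

-- ===== LEMMAS AND PROOFS =====

def pvIdxAux (s : String) : List String → Int → List Int
  | [], _ => []
  | x :: xs, i => (if x = s then [i] else []) ++ pvIdxAux s xs (i + 1)

lemma pvIdxOf_eq_aux (s : String) (row : List String) : pvIdxOf s row = pvIdxAux s row 0 := by
  suffices h : ∀ (row : List String) (i : Int),
      ((PySem.List.enumerate row i).filter (fun p => p.2 == s)).map (·.1) = pvIdxAux s row i from h row 0
  intro row
  induction row with
  | nil => intro i; simp [PySem.List.enumerate_nil, pvIdxAux]
  | cons x xs ih =>
    intro i
    rw [PySem.List.enumerate_cons]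
    by_cases hx : x = s <;> simp [hx, pvIdxAux, ih]

lemma pvIdxAux_bounds (s : String) : ∀ (row : List String) (i : Int),
    (∀ t ∈ pvIdxAux s row i, i ≤ t ∧ t < i + row.length) ∧ (pvIdxAux s row i).Pairwise (· < ·) := by
  intro row
  induction row with
  | nil => intro i; simp [pvIdxAux]
  | cons x xs ih =>
    intro i
    have h := ih (i + 1)
    constructor
    · intro t ht
      simp only [pvIdxAux, List.mem_append] at ht
      rcases ht with ht | ht
      · rcases (by split at ht <;> simp_all : t = i) with rfl
        simp only [List.length_cons]; push_cast; omega
      · have := h.1 t ht; simp only [List.length_cons]; push_cast; omega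
    · simp only [pvIdxAux]
      rcases (by split <;> simp : (if x = s then [i] else []) = [i] ∨ (if x = s then [i] else []) = ([] : List Int)) with he | he
      · rw [he]
        refine List.Pairwise.cons ?_ h.2
        intro t ht; have := h.1 t ht; omega
      · rw [he]; simpa using h.2

lemma mem_pvIdxAux (s : String) : ∀ (row : List String) (i t : Int),
    t ∈ pvIdxAux s row i ↔ ∃ j : Nat, j < row.length ∧ row[j]? = some s ∧ t = i + j := by
  intro row
  induction row with
  | nil => intro i t; simp [pvIdxAux]
  | cons x xs ih =>
    intro i t
    simp only [pvIdxAux, List.mem_append, ih (i + 1)]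
    constructor
    · rintro (ht | ⟨j, hj, hget, rfl⟩)
      · have hx : x = s ∧ t = i := by split at ht <;> simp_all
        exact ⟨0, by simp [hx.1], by simp [hx.1, hx.2]⟩
      · exact ⟨j + 1, by simpa using hj, by simpa using hget, by push_cast; ring⟩
    · rintro ⟨j, hj, hget, rfl⟩
      cases j with
      | zero => left; simp at hget; simp [hget]
      | succ j =>
        right
        exact ⟨j, by simpa using hj, by simpa using hget, by push_cast; ring⟩

lemma mem_pvIdxAux_pyGet (s : String) (row : List String) (t : Int) :
    t ∈ pvIdxAux s row 0 ↔ 0 ≤ t ∧ t < row.length ∧ PySem.List.pyGet? row t = some s := by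
  rw [mem_pvIdxAux]
  constructor
  · rintro ⟨j, hj, hget, rfl⟩
    refine ⟨by positivity, by simpa using hj, ?_⟩
    simpa [PySem.List.pyGet?_natCast] using hget
  · rintro ⟨h0, hlt, hget⟩
    refine ⟨t.toNat, by omega, ?_, by omega⟩
    rwa [PySem.List.pyGet?_of_nonneg _ h0] at hget

lemma pvIdxAux_set (j : Nat) : ∀ (row : List String) (i : Int), j < row.length →
    row[j]? = some "T" →
    pvIdxAux "T" (row.set j "C") i = (pvIdxAux "T" row i).filter (fun t => t ≠ i + j) := by
  induction j with
  | zero =>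
    intro row i hj hget
    cases row with
    | nil => simp at hj
    | cons x xs =>
      simp at hget
      subst hget
      have hall : ∀ t ∈ pvIdxAux "T" xs (i + 1), t ≠ i := by
        intro t ht
        have := (pvIdxAux_bounds "T" xs (i + 1)).1 t ht
        omega
      show pvIdxAux "T" ("C" :: xs) i = _
      simp only [Nat.cast_zero, add_zero]
      have hL : pvIdxAux "T" ("C" :: xs) i = pvIdxAux "T" xs (i + 1) := by simp [pvIdxAux]
      have hR : pvIdxAux "T" ("T" :: xs) i = i :: pvIdxAux "T" xs (i + 1) := by simp [pvIdxAux]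
      have h1 : (pvIdxAux "T" xs (i + 1)).filter (fun t => !decide (t = i)) = pvIdxAux "T" xs (i + 1) :=
        List.filter_eq_self.2 (fun t ht => by simpa using hall t ht)
      rw [hL, hR, List.filter_cons]
      simp [h1]
  | succ j ih =>
    intro row i hj hget
    cases row with
    | nil => simp at hj
    | cons x xs =>
      simp only [List.length_cons] at hj
      simp only [List.getElem?_cons_succ] at hget
      simp only [List.set, pvIdxAux]
      rw [List.filter_append, ih xs (i + 1) (by omega) (by simpa using hget)]
      congr 1
      · split
        · simp [List.filter_cons]
          omega
        · simp
      · congr 1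
        funext t
        simp only [ne_eq, decide_eq_decide]
        constructor <;> intro h <;> (push_cast at *; omega)

lemma sorted_lt_ext : ∀ (l₁ l₂ : List Int), l₁.Pairwise (· < ·) → l₂.Pairwise (· < ·) →
    (∀ x, x ∈ l₁ ↔ x ∈ l₂) → l₁ = l₂ := by
  intro l₁
  induction l₁ with
  | nil =>
    intro l₂ _ _ hm
    cases l₂ with
    | nil => rfl
    | cons y ys => exact absurd ((hm y).2 (by simp)) (by simp)
  | cons x xs ih =>
    intro l₂ h₁ h₂ hm
    cases l₂ with
    | nil => exact absurd ((hm x).1 (by simp)) (by simp)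
    | cons y ys =>
      have hxy : x = y := by
        have hx2 : x ∈ y :: ys := (hm x).1 (by simp)
        have hy1 : y ∈ x :: xs := (hm y).2 (by simp)
        simp only [List.mem_cons] at hx2 hy1
        rcases hx2 with rfl | hx2
        · rfl
        · have hyx : y < x := (List.pairwise_cons.1 h₂).1 x hx2
          rcases hy1 with rfl | hy1
          · omega
          · have := (List.pairwise_cons.1 h₁).1 y hy1; omega
      subst hxy
      have htails : ∀ z, z ∈ xs ↔ z ∈ ys := by
        intro z
        constructor
        · intro hz
          have hzx : x < z := (List.pairwise_cons.1 h₁).1 z hz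
          have : z ∈ x :: ys := (hm z).1 (by simp [hz])
          simp only [List.mem_cons] at this
          rcases this with rfl | h
          · omega
          · exact h
        · intro hz
          have hzx : x < z := (List.pairwise_cons.1 h₂).1 z hz
          have : z ∈ x :: xs := (hm z).2 (by simp [hz])
          simp only [List.mem_cons] at this
          rcases this with rfl | h
          · omega
          · exact h
      rw [ih ys (List.pairwise_cons.1 h₁).2 (List.pairwise_cons.1 h₂).2 htails]



lemma pvInnerA_none (row : List String) (a : Int) : ∀ (items : List Int),
    (∀ item ∈ items, ¬(0 ≤ item ∧ item < (row.length : Int) ∧ PySem.List.pyGet? row item = some "T")) →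
    pvInnerA (row, a) items = (row, a) := by
  intro items
  induction items with
  | nil => intro _; rfl
  | cons item rest ih =>
    intro h
    have hi := h item (by simp)
    simp only [pvInnerA]
    split
    · rename_i hin
      rw [if_neg (fun hT => hi ⟨hin.1, hin.2, hT⟩)]
      exact ih (fun x hx => h x (by simp [hx]))
    · exact ih (fun x hx => h x (by simp [hx]))

lemma pvInnerA_found (row : List String) (a : Int) (t : Int) (post : List Int)
    (ht : 0 ≤ t ∧ t < (row.length : Int) ∧ PySem.List.pyGet? row t = some "T") :
    ∀ (pre : List Int),
    (∀ item ∈ pre, ¬(0 ≤ item ∧ item < (row.length : Int) ∧ PySem.List.pyGet? row item = some "T")) →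
    pvInnerA (row, a) (pre ++ t :: post) = (row.set t.toNat "C", a + 1) := by
  intro pre
  induction pre with
  | nil =>
    intro _
    simp only [List.nil_append, pvInnerA, if_pos (And.intro ht.1 ht.2.1), if_pos ht.2.2]
    rw [PySem.List.pySetD_of_nonneg _ _ ht.1]
  | cons item rest ih =>
    intro h
    have hi := h item (by simp)
    simp only [List.cons_append, pvInnerA]
    split
    · rename_i hin
      rw [if_neg (fun hT => hi ⟨hin.1, hin.2, hT⟩)]
      exact ih (fun x hx => h x (by simp [hx]))
    · exact ih (fun x hx => h x (by simp [hx]))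

lemma pvTwoPtr_nil_right (k : Int) (ps : List Int) : pvTwoPtr k ps [] = 0 := by
  cases ps <;> simp [pvTwoPtr]

lemma pvTwoPtr_skip (k : Int) : ∀ (ts₀ : List Int) (ps ts : List Int),
    (∀ x ∈ ts₀, ∀ c ∈ ps, x < c - k) → pvTwoPtr k ps (ts₀ ++ ts) = pvTwoPtr k ps ts := by
  intro ts₀
  induction ts₀ with
  | nil => intro ps ts _; rfl
  | cons x ts₀' ih =>
    intro ps ts h
    cases ps with
    | nil => simp [pvTwoPtr]
    | cons c ps' =>
      have hx : x < c - k := h x (by simp) c (by simp)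
      simp only [List.cons_append, pvTwoPtr, if_pos hx]
      exact ih _ _ (fun y hy c' hc' => h y (by simp [hy]) c' hc')

lemma pvTwoPtr_zero (k : Int) : ∀ (ts ps : List Int),
    (∀ x ∈ ts, ∀ c ∈ ps, x < c - k) → pvTwoPtr k ps ts = 0 := by
  intro ts ps h
  have := pvTwoPtr_skip k ts ps [] h
  simpa [pvTwoPtr_nil_right] using this


lemma pvColsA_eq (k : Int) : ∀ (cs : List Int) (row : List String) (a : Int),
    cs.Pairwise (· ≤ ·) → (∀ c ∈ cs, 0 ≤ c) →
    (pvColsA k (row, a) cs).2 =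
      a + pvTwoPtr k (cs.filter (fun c => PySem.List.pyGet? row c == some "P")) (pvIdxAux "T" row 0) := by
  intro cs
  induction cs with
  | nil => intro row a _ _; simp [pvColsA, pvTwoPtr]
  | cons c cs ih =>
    intro row a hsort hpos
    have hsort' := (List.pairwise_cons.1 hsort).2
    have hle : ∀ c' ∈ cs, c ≤ c' := (List.pairwise_cons.1 hsort).1
    have hpos' : ∀ c' ∈ cs, 0 ≤ c' := fun c' h => hpos c' (by simp [h])
    have hc0 : (0:Int) ≤ c := hpos c (by simp)
    by_cases hP : PySem.List.pyGet? row c = some "P"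
    case neg =>
      have hPb : (PySem.List.pyGet? row c == some "P") = false := by simp [hP]
      simp only [pvColsA, if_neg hP, List.filter_cons, hPb, Bool.false_eq_true, if_false]
      exact ih row a hsort' hpos'
    case pos =>
      have hPb : (PySem.List.pyGet? row c == some "P") = true := by simp [hP]
      simp only [pvColsA, if_pos hP, List.filter_cons, hPb, if_true]
      set ts := pvIdxAux "T" row 0 with hts
      set ps := cs.filter (fun c' => PySem.List.pyGet? row c' == some "P") with hps
      have hps_ge : ∀ c' ∈ ps, c ≤ c' := fun c' h => hle c' (List.mem_of_mem_filter h)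
      have memT : ∀ x : Int, x ∈ ts ↔ 0 ≤ x ∧ x < row.length ∧ PySem.List.pyGet? row x = some "T" :=
        fun x => mem_pvIdxAux_pyGet "T" row x
      have hsorted : ts.Pairwise (· < ·) := (pvIdxAux_bounds "T" row 0).2
      set ts₁ := ts.takeWhile (fun t => decide (t < c - k)) with hts₁def
      set ts₂ := ts.dropWhile (fun t => decide (t < c - k)) with hts₂def
      have hsplit : ts₁ ++ ts₂ = ts := List.takeWhile_append_dropWhile
      have hts₁lt : ∀ x ∈ ts₁, x < c - k := fun x hx => by simpa using List.mem_takeWhile_imp hx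
      cases hts2 : ts₂ with
      | nil =>
        have hall : ∀ x ∈ ts, x < c - k := by
          intro x hx
          rw [← hsplit, hts2] at hx
          simp only [List.append_nil] at hx
          exact hts₁lt x hx
        have hnone : ∀ item ∈ PySem.List.pyRange (c - k) (c + k + 1) 1,
            ¬(0 ≤ item ∧ item < (row.length : Int) ∧ PySem.List.pyGet? row item = some "T") := by
          intro item hin hc
          have h1 : item ∈ ts := (memT item).2 hc
          have h2 := hall item h1
          have h3 := (PySem.List.mem_pyRange_one.1 hin).1
          omega
        rw [pvInnerA_none row a _ hnone, ih row a hsort' hpos']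
        rw [pvTwoPtr_zero k ts ps (fun x hx c' hc' => by have := hall x hx; have := hps_ge c' hc'; omega)]
        rw [pvTwoPtr_zero k ts (c :: ps) (fun x hx c' hc' => by
          have := hall x hx
          rcases List.mem_cons.1 hc' with rfl | hc'
          · omega
          · have := hps_ge c' hc'; omega)]
      | cons t rest =>
        have htsdecomp : ts = ts₁ ++ t :: rest := by rw [← hsplit, hts2]
        have htmem : t ∈ ts := by rw [htsdecomp]; simp
        have htge : c - k ≤ t := by
          have h := List.head?_dropWhile_not (fun t => decide (t < c - k)) ts
          rw [← hts₂def, hts2] at h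
          simp only [List.head?_cons] at h
          simp at h
          omega
        have htT := (memT t).1 htmem
        have hpair := (List.pairwise_append.1 (htsdecomp ▸ hsorted))
        have hrest_gt : ∀ x ∈ rest, t < x := (List.pairwise_cons.1 hpair.2.1).1
        have hskipOK : ∀ x ∈ ts₁, ∀ c' ∈ c :: ps, x < c' - k := by
          intro x hx c' hc'
          have h1 := hts₁lt x hx
          rcases List.mem_cons.1 hc' with rfl | hc'
          · omega
          · have := hps_ge c' hc'; omega
        have hskipOK' : ∀ x ∈ ts₁, ∀ c' ∈ ps, x < c' - k :=
          fun x hx c' hc' => hskipOK x hx c' (by simp [hc'])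
        by_cases hwin : t ≤ c + k
        case pos =>
          -- the scan catches t
          have hrange : PySem.List.pyRange (c - k) (c + k + 1) 1 =
              PySem.List.pyRange (c - k) t 1 ++ t :: PySem.List.pyRange (t + 1) (c + k + 1) 1 := by
            have h1 := PySem.List.pyRange_one_append (c - k) t (c + k + 1) htge (by omega)
            have h2 : PySem.List.pyRange t (c + k + 1) 1 = t :: PySem.List.pyRange (t + 1) (c + k + 1) 1 :=
              PySem.List.pyRange_one_cons (by omega)
            rw [h1, h2]
          have hpre : ∀ item ∈ PySem.List.pyRange (c - k) t 1,
              ¬(0 ≤ item ∧ item < (row.length : Int) ∧ PySem.List.pyGet? row item = some "T") := by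
            intro item hin hc
            have h1 : item ∈ ts := (memT item).2 hc
            have h2 := PySem.List.mem_pyRange_one.1 hin
            rw [htsdecomp] at h1
            rcases List.mem_append.1 h1 with h1 | h1
            · have := hts₁lt item h1; omega
            · rcases List.mem_cons.1 h1 with rfl | h1
              · omega
              · have := hrest_gt item h1; omega
          rw [hrange, pvInnerA_found row a t _ htT _ hpre]
          set row' := row.set t.toNat "C" with hrow'
          rw [ih row' (a + 1) hsort' hpos']
          have hlen' : t.toNat < row.length := by omega
          have hgetT : row[t.toNat]? = some "T" := by
            have := htT.2.2
            rwa [PySem.List.pyGet?_of_nonneg _ htT.1] at this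
          -- police positions unchanged
          have hfilter : cs.filter (fun c' => PySem.List.pyGet? row' c' == some "P") = ps := by
            rw [hps]
            apply List.filter_congr
            intro c' hc'
            have h0 : (0:Int) ≤ c' := hpos' c' hc'
            rw [PySem.List.pyGet?_of_nonneg _ h0, PySem.List.pyGet?_of_nonneg _ h0, hrow',
              List.getElem?_set]
            split
            · rename_i heq
              have hct : c' = t := by omega
              subst hct
              rw [hgetT]
              simp
            · rfl
          -- thief positions lose t
          have hthief : pvIdxAux "T" row' 0 = ts₁ ++ rest := by
            rw [hrow', pvIdxAux_set t.toNat row 0 hlen' hgetT]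
            have hcast : ((0:Int) + (t.toNat : Int)) = t := by omega
            rw [hcast, ← hts, htsdecomp, List.filter_append]
            have h1 : ts₁.filter (fun x => x ≠ t) = ts₁ :=
              List.filter_eq_self.2 (fun x hx => by have := hts₁lt x hx; simp; omega)
            have h2 : (t :: rest).filter (fun x => x ≠ t) = rest := by
              rw [List.filter_cons]
              simp only [ne_eq, decide_not]
              rw [if_neg (by simp)]
              exact List.filter_eq_self.2 (fun x hx => by have := hrest_gt x hx; simp; omega)
            rw [h1, h2]
          rw [hfilter, hthief]
          rw [pvTwoPtr_skip k ts₁ ps rest hskipOK']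
          rw [htsdecomp, pvTwoPtr_skip k ts₁ (c :: ps) (t :: rest) hskipOK]
          have : pvTwoPtr k (c :: ps) (t :: rest) = 1 + pvTwoPtr k ps rest := by
            rw [pvTwoPtr]
            rw [if_neg (by omega), if_neg (by omega)]
          rw [this]
          ring
        case neg =>
          -- no thief in the window
          have hnone : ∀ item ∈ PySem.List.pyRange (c - k) (c + k + 1) 1,
              ¬(0 ≤ item ∧ item < (row.length : Int) ∧ PySem.List.pyGet? row item = some "T") := by
            intro item hin hc
            have h1 : item ∈ ts := (memT item).2 hc
            have h2 := PySem.List.mem_pyRange_one.1 hin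
            rw [htsdecomp] at h1
            rcases List.mem_append.1 h1 with h1 | h1
            · have := hts₁lt item h1; omega
            · rcases List.mem_cons.1 h1 with rfl | h1
              · omega
              · have := hrest_gt item h1; omega
          rw [pvInnerA_none row a _ hnone, ih row a hsort' hpos', ← hps, ← hts]
          rw [htsdecomp, pvTwoPtr_skip k ts₁ ps (t :: rest) hskipOK',
            pvTwoPtr_skip k ts₁ (c :: ps) (t :: rest) hskipOK]
          have : pvTwoPtr k (c :: ps) (t :: rest) = pvTwoPtr k ps (t :: rest) := by
            rw [pvTwoPtr]
            rw [if_neg (by omega), if_pos (by omega)]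
          rw [this]

lemma pvRange_filter_eq (row : List String) :
    (PySem.List.pyRange 0 (row.length : Int) 1).filter
      (fun c => PySem.List.pyGet? row c == some "P") = pvIdxAux "P" row 0 := by
  apply sorted_lt_ext
  · exact List.Pairwise.filter _ (PySem.List.pairwise_lt_pyRange_one 0 (row.length : Int))
  · exact (pvIdxAux_bounds "P" row 0).2
  · intro x
    rw [List.mem_filter, mem_pvIdxAux_pyGet, PySem.List.mem_pyRange_one]
    simp only [beq_iff_eq]
    tauto

lemma pvRow_eq (k : Int) (row : List String) (a : Int) :
    (pvColsA k (row, a) (PySem.List.pyRange 0 (row.length : Int) 1)).2 =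
      a + pvTwoPtr k (pvIdxOf "P" row) (pvIdxOf "T" row) := by
  rw [pvColsA_eq k _ row a
      ((PySem.List.pairwise_lt_pyRange_one 0 (row.length : Int)).imp le_of_lt)
      (fun c hc => (PySem.List.mem_pyRange_one.1 hc).1)]
  rw [pvRange_filter_eq, pvIdxOf_eq_aux, pvIdxOf_eq_aux]


-- ===== VERDICT (by name: the statement is the Claim_ definition above) =====
theorem police_and_thieves_spec : Claim_equal_police_and_thieves := by
  intro grid k _
  unfold Spec_police_and_thieves police_and_thieves police_and_thieves_alt
  simp only [pvRow_eq]
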